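-- pv_equiv track=rewrite | github.com/danielrosehill/Remote-Jobs-Research-Agent | as-agent/company_research.py | filter_career_emails
-- ===== SOURCE A (Python) =====
-- def filter_career_emails(emails_data):
--     """Filter emails to find career-related, founder, and generic/non-generic addresses."""
--     if not emails_data or "data" not in emails_data:
--         return [], [], [], []
--
--     career_emails = []
--     founder_emails = []
--     generic_emails = []
--     non_generic_emails = []
--
--     for email in emails_data["data"]["emails"]:
--         # Get values with safe defaults
--         email_address = email.get("value", "")
--         position = email.get("position", "")
--         position = position.lower() if position else ""
--
--         first_name = email.get("first_name", "")
--         first_name = first_name.lower() if first_name else ""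
--
--         last_name = email.get("last_name", "")
--         last_name = last_name.lower() if last_name else ""
--
--         department = email.get("department", "")
--         department = department.lower() if department else ""
--
--         type_value = email.get("type", "")
--
--         # Check for generic emails
--         if type_value == "generic":
--             generic_emails.append(email)
--             # Only add up to 3 generic emails
--             if len(generic_emails) >= 3:
--                 generic_emails = generic_emails[:3]
--
--         # Check for non-generic emails
--         elif type_value != "generic" and first_name and last_name:
--             non_generic_emails.append(email)
--             # Only add up to 3 non-generic emails
--             if len(non_generic_emails) >= 3:
--                 non_generic_emails = non_generic_emails[:3]
--
--         # Check for career-related emails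
--         career_keywords = ["career", "recruit", "hr", "hiring", "talent", "job", "human resource"]
--         if (position and any(keyword in position for keyword in career_keywords)) or \
--            (department and any(keyword in department for keyword in career_keywords)) or \
--            (email_address and any(keyword in email_address.lower() for keyword in career_keywords)):
--             career_emails.append(email)
--
--         # Check for founder emails
--         founder_keywords = ["founder", "ceo", "chief executive", "president", "owner"]
--         if position and any(keyword in position for keyword in founder_keywords):
--             founder_emails.append(email)
--
--     return career_emails, founder_emails, generic_emails, non_generic_emails
-- ===== SOURCE B (Python) =====
-- def filter_career_emails(emails_data):
--     """Filter emails to find career-related, founder, and generic/non-generic addresses."""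
--     if not emails_data or "data" not in emails_data:
--         return [], [], [], []
--     emails = emails_data["data"].get("emails", [])
--
--     def low(e, k):
--         return e.get(k, "").lower()
--
--     career_kw = ["career", "recruit", "hr", "hiring", "talent", "job", "human resource"]
--     founder_kw = ["founder", "ceo", "chief executive", "president", "owner"]
--
--     career = [e for e in emails
--               if any(kw in low(e, "position") or kw in low(e, "department")
--                      or kw in low(e, "value") for kw in career_kw)]
--     founder = [e for e in emails
--                if any(kw in low(e, "position") for kw in founder_kw)]
--     generic = [e for e in emails if e.get("type", "") == "generic"][:3]
--     non_generic = [e for e in emails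
--                    if e.get("type", "") != "generic"
--                    and low(e, "first_name") and low(e, "last_name")][:3]
--     return career, founder, generic, non_generic
-- ===== Notes on version B (the rewrite author's own statement) =====
-- stated objective: simpler
-- what changed: Replaces A's single interleaved loop with mutable accumulators and in-loop truncation by four independent filtering comprehensions over the email list, with plain [:3] slices for the capped lists.
import Mathlib
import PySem

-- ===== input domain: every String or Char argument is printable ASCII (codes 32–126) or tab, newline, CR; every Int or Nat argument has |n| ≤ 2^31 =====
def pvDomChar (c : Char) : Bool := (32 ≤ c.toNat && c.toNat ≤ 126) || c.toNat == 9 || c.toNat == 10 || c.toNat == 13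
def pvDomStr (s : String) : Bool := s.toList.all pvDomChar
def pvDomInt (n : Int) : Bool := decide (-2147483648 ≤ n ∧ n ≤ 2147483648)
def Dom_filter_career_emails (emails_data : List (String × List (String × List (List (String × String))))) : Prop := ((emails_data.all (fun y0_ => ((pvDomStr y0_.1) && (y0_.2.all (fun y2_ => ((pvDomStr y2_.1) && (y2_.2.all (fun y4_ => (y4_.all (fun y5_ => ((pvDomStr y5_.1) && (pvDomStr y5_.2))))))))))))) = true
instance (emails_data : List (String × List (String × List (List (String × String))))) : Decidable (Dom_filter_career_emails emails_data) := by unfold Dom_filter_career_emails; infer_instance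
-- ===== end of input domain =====

-- B replaces A's single interleaved loop (mutable accumulators, in-loop truncation) by four
-- independent filter passes with [:3] slices: simpler decomposition, same cost.

-- shared primitive: Python dict lookup on an association list (first match)
def pvLookup {α : Type} (d : List (String × α)) (k : String) : Option α :=
  (d.find? (fun p => p.1 == k)).map (·.2)

def pvGetS (e : List (String × String)) (k : String) : String :=
  (pvLookup e k).getD ""

-- ===== PORT A =====
def pvCareerKw : List String :=
  ["career", "recruit", "hr", "hiring", "talent", "job", "human resource"]

def pvFounderKw : List String :=
  ["founder", "ceo", "chief executive", "president", "owner"]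

-- the for-loop of A over the emails, state = (career, founder, generic, non_generic)
def pvLoopA : List (List (String × String)) →
    (List (List (String × String))) × (List (List (String × String))) × (List (List (String × String))) × (List (List (String × String))) →
    (List (List (String × String))) × (List (List (String × String))) × (List (List (String × String))) × (List (List (String × String)))
  | [], st => st
  | email :: rest, (career, founder, generic, non_generic) =>
    let email_address := pvGetS email "value"
    let position0 := pvGetS email "position"
    let position := if position0 == "" then "" else PySem.Str.lower position0
    let first_name0 := pvGetS email "first_name"
    let first_name := if first_name0 == "" then "" else PySem.Str.lower first_name0
    let last_name0 := pvGetS email "last_name"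
    let last_name := if last_name0 == "" then "" else PySem.Str.lower last_name0
    let department0 := pvGetS email "department"
    let department := if department0 == "" then "" else PySem.Str.lower department0
    let type_value := pvGetS email "type"
    let generic :=
      if type_value == "generic" then
        let g := generic ++ [email]
        if 3 ≤ g.length then g.take 3 else g
      else generic
    let non_generic :=
      if !(type_value == "generic") &&
         (type_value != "generic" && !(first_name == "") && !(last_name == "")) then
        let ng := non_generic ++ [email]
        if 3 ≤ ng.length then ng.take 3 else ng
      else non_generic
    let career :=
      if (!(position == "") && pvCareerKw.any (fun kw => PySem.Str.isIn kw position)) ||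
         (!(department == "") && pvCareerKw.any (fun kw => PySem.Str.isIn kw department)) ||
         (!(email_address == "") && pvCareerKw.any (fun kw => PySem.Str.isIn kw (PySem.Str.lower email_address))) then
        career ++ [email]
      else career
    let founder :=
      if !(position == "") && pvFounderKw.any (fun kw => PySem.Str.isIn kw position) then
        founder ++ [email]
      else founder
    pvLoopA rest (career, founder, generic, non_generic)

def filter_career_emails (emails_data : List (String × List (String × List (List (String × String))))) : (List (List (String × String))) × (List (List (String × String))) × (List (List (String × String))) × (List (List (String × String))) :=
  if emails_data.isEmpty || !(emails_data.any (fun p => p.1 == "data")) then ([], [], [], [])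
  else
    -- emails_data["data"]["emails"]; the inner subscript raises KeyError when "emails" is
    -- missing — that case is totalized with [] here and excluded by Pre_filter_career_emails
    let emails := ((pvLookup emails_data "data").bind (fun d => pvLookup d "emails")).getD []
    pvLoopA emails ([], [], [], [])

-- ===== PORT B =====
def pvLow (e : List (String × String)) (k : String) : String :=
  PySem.Str.lower (pvGetS e k)

def filter_career_emails_alt (emails_data : List (String × List (String × List (List (String × String))))) : (List (List (String × String))) × (List (List (String × String))) × (List (List (String × String))) × (List (List (String × String))) :=
  if emails_data.isEmpty || !(emails_data.any (fun p => p.1 == "data")) then ([], [], [], [])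
  else
    -- emails_data["data"].get("emails", [])
    let emails := ((pvLookup emails_data "data").map (fun d => (pvLookup d "emails").getD [])).getD []
    let career := emails.filter (fun e =>
      pvCareerKw.any (fun kw =>
        PySem.Str.isIn kw (pvLow e "position") || PySem.Str.isIn kw (pvLow e "department") ||
        PySem.Str.isIn kw (pvLow e "value")))
    let founder := emails.filter (fun e =>
      pvFounderKw.any (fun kw => PySem.Str.isIn kw (pvLow e "position")))
    let generic := (emails.filter (fun e => pvGetS e "type" == "generic")).take 3
    let non_generic := (emails.filter (fun e =>
      pvGetS e "type" != "generic" &&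
      !(pvLow e "first_name" == "") && !(pvLow e "last_name" == ""))).take 3
    (career, founder, generic, non_generic)

-- ===== PRECONDITION & SPEC =====
-- Pre_ excludes exactly the inputs where A raises KeyError (a non-empty dict containing the
-- key "data" whose value lacks the key "emails"); B returns ([], [], [], []) on those inputs.
def pvPreBool (emails_data : List (String × List (String × List (List (String × String))))) : Bool :=
  if emails_data.isEmpty || !(emails_data.any (fun p => p.1 == "data")) then true
  else match pvLookup emails_data "data" with
       | some d => d.any (fun q => q.1 == "emails")
       | none => true

def Pre_filter_career_emails (emails_data : List (String × List (String × List (List (String × String))))) : Prop :=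
  pvPreBool emails_data = true
instance (emails_data : List (String × List (String × List (List (String × String))))) : Decidable (Pre_filter_career_emails emails_data) := by unfold Pre_filter_career_emails; infer_instance

def pvWitness_filter_career_emails : (List (String × List (String × List (List (String × String))))) :=
  [("data", [("emails", [[("type", "generic")], [("position", "HR Manager")]])])]

def Spec_filter_career_emails (emails_data : List (String × List (String × List (List (String × String))))) (out : (List (List (String × String))) × (List (List (String × String))) × (List (List (String × String))) × (List (List (String × String)))) : Prop := out = filter_career_emails_alt emails_data
instance (emails_data : List (String × List (String × List (List (String × String))))) (out : (List (List (String × String))) × (List (List (String × String))) × (List (List (String × String))) × (List (List (String × String)))) : Decidable (Spec_filter_career_emails emails_data out) := by unfold Spec_filter_career_emails; infer_instance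

-- ===== CLAIM (what is proved, stated in full; the proofs are below) =====
def Claim_equal_filter_career_emails : Prop := ∀ (emails_data : List (String × List (String × List (List (String × String))))), Dom_filter_career_emails emails_data → Pre_filter_career_emails emails_data → Spec_filter_career_emails emails_data (filter_career_emails emails_data)

-- ===== LEMMAS AND PROOFS =====

theorem pv_take_append_take {α : Type} (xs ys : List α) (n : Nat) :
    ((xs.take n) ++ ys).take n = (xs ++ ys).take n := by
  rw [List.take_append, List.take_append, List.take_take, Nat.min_self, List.length_take]
  have h : n - min n xs.length = n - xs.length := by omega
  rw [h]

-- truncation step: "append then cap at 3" is "take 3 of the append"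
theorem pv_cap_step {α : Type} (g : List α) (e : α) :
    (if 3 ≤ (g ++ [e]).length then (g ++ [e]).take 3 else (g ++ [e])) = (g ++ [e]).take 3 := by
  split_ifs with h
  · rfl
  · exact (List.take_of_length_le (by omega)).symm

theorem pv_career_empty : pvCareerKw.any (fun kw => PySem.Str.isIn kw "") = false := by decide

theorem pv_founder_empty : pvFounderKw.any (fun kw => PySem.Str.isIn kw "") = false := by decide

theorem pv_lowIf (s : String) : (if s == "" then "" else PySem.Str.lower s) = PySem.Str.lower s := by
  split_ifs with h
  · simp at h; subst h; rfl
  · rfl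

theorem pv_lower_empty : PySem.Str.lower "" = "" := by decide

-- truthiness guard before a keyword scan is redundant (no keyword occurs in "")
theorem pv_guard_any (ks : List String) (s : String)
    (h0 : ks.any (fun kw => PySem.Str.isIn kw "") = false) :
    (!(s == "") && ks.any (fun kw => PySem.Str.isIn kw s)) = ks.any (fun kw => PySem.Str.isIn kw s) := by
  by_cases h : s = ""
  · subst h; rw [h0]; simp
  · simp [h]

theorem pv_guard_any' (ks : List String) (s : String)
    (h0 : ks.any (fun kw => PySem.Str.isIn kw "") = false) :
    (!(s == "") && ks.any (fun kw => PySem.Str.isIn kw (PySem.Str.lower s))) =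
      ks.any (fun kw => PySem.Str.isIn kw (PySem.Str.lower s)) := by
  by_cases h : s = ""
  · subst h; rw [pv_lower_empty, h0]; simp
  · simp [h]

theorem pv_any_or3 (ks : List String) (p q r : String → Bool) :
    (ks.any (fun kw => p kw || q kw || r kw)) = (ks.any p || ks.any q || ks.any r) := by
  induction ks with
  | nil => rfl
  | cons k ks ih =>
    simp only [List.any_cons, ih]
    cases p k <;> cases q k <;> cases r k <;> simp

-- B's per-email predicates (the filter bodies of filter_career_emails_alt)
def pvPc (e : List (String × String)) : Bool :=
  pvCareerKw.any (fun kw =>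
    PySem.Str.isIn kw (pvLow e "position") || PySem.Str.isIn kw (pvLow e "department") ||
    PySem.Str.isIn kw (pvLow e "value"))

def pvPf (e : List (String × String)) : Bool :=
  pvFounderKw.any (fun kw => PySem.Str.isIn kw (pvLow e "position"))

def pvPg (e : List (String × String)) : Bool :=
  pvGetS e "type" == "generic"

def pvPng (e : List (String × String)) : Bool :=
  pvGetS e "type" != "generic" && !(pvLow e "first_name" == "") && !(pvLow e "last_name" == "")

-- A's per-email conditions coincide with B's predicates
theorem pv_condC (e : List (String × String)) :
    ((!(PySem.Str.lower (pvGetS e "position") == "") &&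
        pvCareerKw.any (fun kw => PySem.Str.isIn kw (PySem.Str.lower (pvGetS e "position")))) ||
     (!(PySem.Str.lower (pvGetS e "department") == "") &&
        pvCareerKw.any (fun kw => PySem.Str.isIn kw (PySem.Str.lower (pvGetS e "department")))) ||
     (!(pvGetS e "value" == "") &&
        pvCareerKw.any (fun kw => PySem.Str.isIn kw (PySem.Str.lower (pvGetS e "value"))))) = pvPc e := by
  rw [pv_guard_any _ _ pv_career_empty, pv_guard_any _ _ pv_career_empty,
      pv_guard_any' _ _ pv_career_empty]
  rw [pvPc, pv_any_or3]
  rfl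

theorem pv_condF (e : List (String × String)) :
    (!(PySem.Str.lower (pvGetS e "position") == "") &&
       pvFounderKw.any (fun kw => PySem.Str.isIn kw (PySem.Str.lower (pvGetS e "position")))) = pvPf e := by
  rw [pv_guard_any _ _ pv_founder_empty]
  rfl

theorem pv_condNg (e : List (String × String)) :
    (!(pvGetS e "type" == "generic") &&
      (pvGetS e "type" != "generic" && !(PySem.Str.lower (pvGetS e "first_name") == "") &&
       !(PySem.Str.lower (pvGetS e "last_name") == ""))) = pvPng e := by
  simp only [pvPng, pvLow, bne]
  cases h : (pvGetS e "type" == "generic") <;>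
    cases h1 : (PySem.Str.lower (pvGetS e "first_name") == "") <;>
    cases h2 : (PySem.Str.lower (pvGetS e "last_name") == "") <;>
    simp

-- the loop of A computes B's four filtered lists
theorem pvLoopA_eq (emails : List (List (String × String)))
    (c f g ng : List (List (String × String)))
    (hg3 : g.length ≤ 3) (hng3 : ng.length ≤ 3) :
    pvLoopA emails (c, f, g, ng) =
      (c ++ emails.filter pvPc, f ++ emails.filter pvPf,
       (g ++ emails.filter pvPg).take 3, (ng ++ emails.filter pvPng).take 3) := by
  induction emails generalizing c f g ng with
  | nil => simp [pvLoopA, List.take_of_length_le hg3, List.take_of_length_le hng3]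
  | cons e rest ih =>
    rw [pvLoopA]
    simp only [pv_lowIf, pv_cap_step, pv_condC, pv_condF, pv_condNg]
    rw [ih _ _ _ _
      (by split_ifs <;> simp [List.length_take, hg3])
      (by split_ifs <;> simp [List.length_take, hng3])]
    simp only [List.filter_cons, Prod.mk.injEq]
    refine ⟨?_, ?_, ?_, ?_⟩
    · cases pvPc e <;> simp
    · cases pvPf e <;> simp
    · have hg : (pvGetS e "type" == "generic") = pvPg e := rfl
      rw [hg]
      cases pvPg e
      · simp
      · rw [if_pos rfl, if_pos rfl, pv_take_append_take]
        simp
    · cases pvPng e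
      · simp
      · rw [if_pos rfl, if_pos rfl, pv_take_append_take]
        simp

theorem pv_emails_eq (emails_data : List (String × List (String × List (List (String × String))))) :
    ((pvLookup emails_data "data").bind (fun d => pvLookup d "emails")).getD [] =
    ((pvLookup emails_data "data").map (fun d => (pvLookup d "emails").getD [])).getD [] := by
  cases pvLookup emails_data "data" with
  | none => rfl
  | some d => cases pvLookup d "emails" <;> rfl

-- ===== VERDICT (by name: the statement is the Claim_ definition above) =====
theorem filter_career_emails_spec : Claim_equal_filter_career_emails := by
  intro ed _ _
  unfold Spec_filter_career_emails filter_career_emails filter_career_emails_alt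
  split_ifs with h
  · rfl
  · rw [← pv_emails_eq, pvLoopA_eq _ _ _ _ _ (by simp) (by simp)]
    simp only [List.nil_append]
    unfold pvPc pvPf pvPg pvPng
    rfl
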